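-- pv_equiv track=rewrite | github.com/honghuy127/aegis-runtime-public | main.py | _is_google_host
-- ===== SOURCE A (Python) =====
-- def _is_google_host(hostname: str) -> bool:
--     """Return True for google.* hosts (e.g. google.com, google.co.jp, www.google.co.uk)."""
--     host = (hostname or "").strip().lower().strip(".")
--     if not host:
--         return False
--     labels = [part for part in host.split(".") if part]
--     if not labels:
--         return False
--     return "google" in labels
-- ===== SOURCE B (Python) =====
-- def _is_google_host(hostname: str) -> bool:
--     """Return True for google.* hosts (e.g. google.com, google.co.jp, www.google.co.uk)."""
--     host = (hostname or "").strip().lower().strip(".")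
--     return (host == "google" or host.startswith("google.")
--             or host.endswith(".google") or ".google." in host)
-- ===== Notes on version B (the rewrite author's own statement) =====
-- stated objective: idiomatic
-- what changed: B builds no label list and drops the emptiness guards: it tests the normalized host directly for a whole dot-delimited google label via one equality, one prefix, one suffix and one substring check.
import Mathlib
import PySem

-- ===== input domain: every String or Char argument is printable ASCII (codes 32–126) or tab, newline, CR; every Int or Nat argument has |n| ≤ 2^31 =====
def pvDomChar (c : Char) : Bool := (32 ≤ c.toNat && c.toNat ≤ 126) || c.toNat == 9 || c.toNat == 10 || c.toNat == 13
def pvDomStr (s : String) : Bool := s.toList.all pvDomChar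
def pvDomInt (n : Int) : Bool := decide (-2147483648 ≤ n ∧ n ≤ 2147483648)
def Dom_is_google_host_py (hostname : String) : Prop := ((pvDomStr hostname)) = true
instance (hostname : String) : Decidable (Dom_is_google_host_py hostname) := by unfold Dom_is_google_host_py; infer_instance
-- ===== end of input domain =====

-- B replaces A's split-into-labels + membership test by direct boundary-delimited substring tests (idiomatic, no label list built).

-- ===== PORT A =====
-- literal port of A; note '(hostname or "")' equals hostname for strings (the fallback is the empty string itself)
def is_google_host_py (hostname : String) : Bool :=
  let host := PySem.Chars.stripChars (PySem.Chars.lower (PySem.Chars.strip hostname.toList)) ['.']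
  if host.isEmpty then false
  else
    let labels := (PySem.Chars.splitOn host ['.']).filter (fun part => !part.isEmpty)
    if labels.isEmpty then false
    else labels.contains "google".toList

-- ===== PORT B =====
def is_google_host_py_alt (hostname : String) : Bool :=
  let host := PySem.Chars.stripChars (PySem.Chars.lower (PySem.Chars.strip hostname.toList)) ['.']
  (host == "google".toList) || PySem.Chars.startswith host "google.".toList
    || PySem.Chars.endswith host ".google".toList || PySem.Chars.isIn ".google.".toList host

-- ===== PRECONDITION & SPEC =====
def Spec_is_google_host_py (hostname : String) (out : Bool) : Prop := out = is_google_host_py_alt hostname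
instance (hostname : String) (out : Bool) : Decidable (Spec_is_google_host_py hostname out) := by unfold Spec_is_google_host_py; infer_instance

-- ===== CLAIM (what is proved, stated in full; the proofs are below) =====
def Claim_equal_is_google_host_py : Prop := ∀ (hostname : String), Dom_is_google_host_py hostname → Spec_is_google_host_py hostname (is_google_host_py hostname)

-- ===== LEMMAS AND PROOFS =====

-- proof-local reference model of Python's str.split(".") (single-char separator)
def splitDot : List Char → List (List Char)
  | [] => [[]]
  | c :: rest =>
    if c = '.' then [] :: splitDot rest
    else match splitDot rest with
      | [] => [[c]]
      | p :: ps => (c :: p) :: ps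

lemma splitDot_ne_nil (l : List Char) : splitDot l ≠ [] := by
  cases l with
  | nil => simp [splitDot]
  | cons c rest =>
    unfold splitDot
    split
    · simp
    · split <;> simp

lemma splitOn_go_eq (fuel : Nat) :
    ∀ (l cur : List Char) (acc : List (List Char)), l.length ≤ fuel →
      PySem.Chars.splitOn.go ['.'] fuel l cur acc =
        acc.reverse ++ (match splitDot l with
          | [] => []
          | p :: ps => (cur.reverse ++ p) :: ps) := by
  induction fuel with
  | zero =>
    intro l cur acc hl
    have : l = [] := by cases l <;> simp_all
    subst this
    simp [PySem.Chars.splitOn.go, splitDot]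
  | succ n ih =>
    intro l cur acc hl
    cases l with
    | nil => simp [PySem.Chars.splitOn.go, splitDot]
    | cons c rest =>
      by_cases hc : c = '.'
      · subst hc
        have hpre : (['.'] : List Char).isPrefixOf ('.' :: rest) = true := by
          simp [List.isPrefixOf]
        rw [PySem.Chars.splitOn.go]
        simp only [hpre, if_pos]
        have hdrop : List.drop (['.'] : List Char).length ('.' :: rest) = rest := rfl
        rw [hdrop]
        rw [ih rest [] (cur.reverse :: acc) (by simpa using Nat.le_of_succ_le_succ hl)]
        obtain ⟨p, ps, hps⟩ : ∃ p ps, splitDot rest = p :: ps := by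
          cases h : splitDot rest with
          | nil => exact absurd h (splitDot_ne_nil rest)
          | cons p ps => exact ⟨p, ps, rfl⟩
        simp [splitDot, hps]
      · have hpre : (['.'] : List Char).isPrefixOf (c :: rest) = false := by
          simp [List.isPrefixOf]
          intro h; exact hc h.symm
        rw [PySem.Chars.splitOn.go]
        simp only [hpre, Bool.false_eq_true]
        rw [ih rest (c :: cur) acc (by simpa using Nat.le_of_succ_le_succ hl)]
        obtain ⟨p, ps, hps⟩ : ∃ p ps, splitDot rest = p :: ps := by
          cases h : splitDot rest with
          | nil => exact absurd h (splitDot_ne_nil rest)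
          | cons p ps => exact ⟨p, ps, rfl⟩
        simp [splitDot, hc, hps]

lemma splitOn_eq_splitDot (l : List Char) :
    PySem.Chars.splitOn l ['.'] = splitDot l := by
  unfold PySem.Chars.splitOn
  rw [splitOn_go_eq (l.length + 1) l [] [] (by omega)]
  obtain ⟨p, ps, hps⟩ : ∃ p ps, splitDot l = p :: ps := by
    cases h : splitDot l with
    | nil => exact absurd h (splitDot_ne_nil l)
    | cons p ps => exact ⟨p, ps, rfl⟩
  simp [hps]

-- first-label / rest structure of splitDot
lemma splitDot_eq_cons (l : List Char) :
    splitDot l = l.takeWhile (fun c => c != '.') ::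
      (match l.dropWhile (fun c => c != '.') with
        | [] => []
        | _ :: r => splitDot r) := by
  induction l with
  | nil => simp [splitDot]
  | cons c rest ih =>
    by_cases hc : c = '.'
    · subst hc; simp [splitDot, List.takeWhile, List.dropWhile]
    · have hb : (fun c => c != '.') c = true := by simp [hc]
      rw [splitDot]
      simp only [if_neg hc, List.takeWhile_cons, hb, if_pos, List.dropWhile_cons]
      rw [ih]

def OkPre (pre : List Char) : Prop := pre = [] ∨ pre.getLast? = some '.'
def OkSuf (suf : List Char) : Prop := suf = [] ∨ suf.head? = some '.'

lemma mem_splitDot_mp (g : List Char) (hg : g ≠ []) :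
    ∀ n l, l.length ≤ n → g ∈ splitDot l →
      ∃ pre suf, l = pre ++ g ++ suf ∧ OkPre pre ∧ OkSuf suf := by
  intro n
  induction n with
  | zero =>
    intro l hl hmem
    have : l = [] := by cases l <;> simp_all
    subst this
    simp [splitDot] at hmem
    exact (hg hmem).elim
  | succ n ih =>
    intro l hl hmem
    rw [splitDot_eq_cons] at hmem
    rcases List.mem_cons.1 hmem with hfirst | hrest
    · refine ⟨[], l.dropWhile (fun c => c != '.'), ?_, Or.inl rfl, ?_⟩
      · rw [hfirst]; simp [List.takeWhile_append_dropWhile]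
      · cases hdw : l.dropWhile (fun c => c != '.') with
        | nil => exact Or.inl rfl
        | cons d r =>
          right
          have hd := List.head_dropWhile_not (fun c => c != '.') (l := l) (by simp [hdw])
          simp [hdw] at hd
          simp [hd]
    · cases hdw : l.dropWhile (fun c => c != '.') with
      | nil => rw [hdw] at hrest; simp at hrest
      | cons d r =>
        rw [hdw] at hrest
        have hd := List.head_dropWhile_not (fun c => c != '.') (l := l) (by simp [hdw])
        simp [hdw] at hd
        subst hd
        have hlen : r.length ≤ n := by
          have := (List.dropWhile_suffix (l := l) (fun c => c != '.')).length_le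
          rw [hdw] at this
          simp at this
          omega
        obtain ⟨pre, suf, heq, hpre, hsuf⟩ := ih r hlen hrest
        refine ⟨l.takeWhile (fun c => c != '.') ++ '.' :: pre, suf, ?_, ?_, hsuf⟩
        · conv_lhs => rw [← List.takeWhile_append_dropWhile (p := fun c => c != '.') (l := l)]
          rw [hdw, heq]
          simp
        · right
          rcases hpre with rfl | hpre
          · rw [List.getLast?_append_of_ne_nil _ (by simp)]
            rfl
          · rw [show l.takeWhile (fun c => c != '.') ++ '.' :: pre
                  = (l.takeWhile (fun c => c != '.') ++ ['.']) ++ pre by simp]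
            rw [List.getLast?_append_of_ne_nil _ (by rintro rfl; simp at hpre)]
            exact hpre

lemma mem_splitDot_mpr (g : List Char) (hdot : ('.' : Char) ∉ g) :
    ∀ n pre, pre.length ≤ n → ∀ suf, OkPre pre → OkSuf suf →
      g ∈ splitDot (pre ++ g ++ suf) := by
  intro n
  induction n with
  | zero =>
    intro pre hl suf hpre hsuf
    have hpe : pre = [] := by cases pre <;> simp_all
    subst hpe
    rw [splitDot_eq_cons]
    apply List.mem_cons.2
    left
    have htg : g.takeWhile (fun c => c != '.') = g := by
      apply List.takeWhile_eq_self_iff.mpr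
      intro x hx
      simp only [bne_iff_ne, ne_eq]
      intro hh
      subst hh
      exact hdot hx
    have hts : suf.takeWhile (fun c => c != '.') = [] := by
      rcases hsuf with rfl | hs
      · rfl
      · cases suf with
        | nil => rfl
        | cons d t =>
          simp at hs
          subst hs
          simp
    rw [List.nil_append, List.takeWhile_append, htg]
    simp [hts]
  | succ n ih =>
    intro pre hl suf hpre hsuf
    rcases hpre with rfl | hpre
    · exact ih [] (by simp) suf (Or.inl rfl) hsuf
    · have hmem : ('.' : Char) ∈ pre := by
        obtain ⟨pre0, rfl⟩ := List.getLast?_eq_some_iff.mp hpre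
        simp
      have hdwp : pre.dropWhile (fun c => c != '.') ≠ [] := by
        intro hnil
        have := List.dropWhile_eq_nil_iff.mp hnil _ hmem
        simp at this
      cases hdw : pre.dropWhile (fun c => c != '.') with
      | nil => exact absurd hdw hdwp
      | cons d q =>
        have hd := List.head_dropWhile_not (fun c => c != '.') (l := pre) (by simp [hdw])
        simp [hdw] at hd
        subst hd
        have hqlen : q.length ≤ n := by
          have := (List.dropWhile_suffix (l := pre) (fun c => c != '.')).length_le
          rw [hdw] at this
          simp at this
          omega
        have hqok : OkPre q := by
          cases hq : q with
          | nil => exact Or.inl rfl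
          | cons x xs =>
            right
            obtain ⟨a, ha⟩ := List.dropWhile_suffix (l := pre) (fun c => c != '.')
            rw [hdw] at ha
            rw [← ha] at hpre
            rw [List.getLast?_append_of_ne_nil _ (by simp)] at hpre
            rw [show ('.' :: q) = ['.'] ++ q by rfl] at hpre
            rw [List.getLast?_append_of_ne_nil _ (by simp [hq])] at hpre
            rw [← hq]
            exact hpre
        have hmem2 : g ∈ splitDot (q ++ g ++ suf) := ih q hqlen suf hqok hsuf
        rw [splitDot_eq_cons]
        apply List.mem_cons.2
        right
        have hdwl : (pre ++ g ++ suf).dropWhile (fun c => c != '.')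
            = '.' :: (q ++ g ++ suf) := by
          rw [List.append_assoc, List.dropWhile_append]
          rw [hdw]
          simp
        rw [hdwl]
        simpa using hmem2

-- the four boundary tests are exactly the decompositions
lemma decomp_iff (g l : List Char) :
    (∃ pre suf, l = pre ++ g ++ suf ∧ OkPre pre ∧ OkSuf suf) ↔
      (l = g ∨ (g ++ ['.']) <+: l ∨ (['.'] ++ g) <:+ l ∨ (['.'] ++ g ++ ['.']) <:+: l) := by
  constructor
  · rintro ⟨pre, suf, rfl, hpre, hsuf⟩
    rcases hpre with rfl | hpre
    · rcases hsuf with rfl | hsuf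
      · left; simp
      · cases suf with
        | nil => left; simp
        | cons d t =>
          simp at hsuf
          subst hsuf
          right; left
          exact ⟨t, by simp⟩
    · obtain ⟨pre0, rfl⟩ := List.getLast?_eq_some_iff.mp hpre
      rcases hsuf with rfl | hsuf
      · right; right; left
        exact ⟨pre0, by simp⟩
      · cases suf with
        | nil => right; right; left; exact ⟨pre0, by simp⟩
        | cons d t =>
          simp at hsuf
          subst hsuf
          right; right; right
          exact ⟨pre0, t, by simp⟩
  · rintro (rfl | ⟨t, ht⟩ | ⟨a, ha⟩ | ⟨s, t, hst⟩)
    · exact ⟨[], [], by simp, Or.inl rfl, Or.inl rfl⟩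
    · refine ⟨[], '.' :: t, by rw [← ht]; simp, Or.inl rfl, Or.inr rfl⟩
    · refine ⟨a ++ ['.'], [], by rw [← ha]; simp, Or.inr ?_, Or.inl rfl⟩
      rw [List.getLast?_append_of_ne_nil _ (by simp)]
      rfl
    · refine ⟨s ++ ['.'], '.' :: t, by rw [← hst]; simp, Or.inr ?_, Or.inr rfl⟩
      rw [List.getLast?_append_of_ne_nil _ (by simp)]
      rfl

lemma contains_filter_nonempty (g : List Char) (hg : g ≠ []) (xs : List (List Char)) :
    (xs.filter (fun part => !part.isEmpty)).contains g = xs.contains g := by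
  rw [List.contains_eq_mem, List.contains_eq_mem, decide_eq_decide]
  simp [List.mem_filter, hg]

lemma core_eq (h : List Char) :
    (if h.isEmpty then false
     else
       let labels := (PySem.Chars.splitOn h ['.']).filter (fun part => !part.isEmpty)
       if labels.isEmpty then false else labels.contains "google".toList)
    = ((h == "google".toList) || PySem.Chars.startswith h "google.".toList
        || PySem.Chars.endswith h ".google".toList || PySem.Chars.isIn ".google.".toList h) := by
  have hg : ("google".toList : List Char) ≠ [] := by decide
  have hdot : ('.' : Char) ∉ "google".toList := by decide
  have hA : (if h.isEmpty then false
      else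
        let labels := (PySem.Chars.splitOn h ['.']).filter (fun part => !part.isEmpty)
        if labels.isEmpty then false else labels.contains "google".toList)
      = (splitDot h).contains "google".toList := by
    by_cases he : h.isEmpty
    · rw [if_pos he]
      have : h = [] := by simpa using he
      subst this
      decide
    · rw [if_neg he]
      simp only []
      by_cases hl : ((PySem.Chars.splitOn h ['.']).filter (fun part => !part.isEmpty)).isEmpty
      · rw [if_pos hl]
        rw [← splitOn_eq_splitDot, ← contains_filter_nonempty _ hg]
        rcases List.isEmpty_iff.mp hl with hnil
        rw [hnil]
        rfl
      · rw [if_neg hl]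
        rw [contains_filter_nonempty _ hg, splitOn_eq_splitDot]
  rw [hA]
  rw [Bool.eq_iff_iff]
  constructor
  · intro hc
    have hmem : "google".toList ∈ splitDot h := by simpa using hc
    obtain ⟨pre, suf, heq, hpre, hsuf⟩ :=
      mem_splitDot_mp _ hg h.length h (le_refl _) hmem
    have h4 := (decomp_iff "google".toList h).mp ⟨pre, suf, heq, hpre, hsuf⟩
    simp only [Bool.or_eq_true, beq_iff_eq]
    rcases h4 with h1 | h2 | h3 | h4
    · exact Or.inl (Or.inl (Or.inl h1))
    · exact Or.inl (Or.inl (Or.inr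
        ((PySem.Chars.startswith_iff _ _).mpr (by simpa using h2))))
    · exact Or.inl (Or.inr ((PySem.Chars.endswith_iff _ _).mpr (by simpa using h3)))
    · exact Or.inr ((PySem.Chars.isIn_iff_infix _ _).mpr (by simpa using h4))
  · intro hb
    have h4 : h = "google".toList ∨ ("google".toList ++ ['.']) <+: h ∨
        (['.'] ++ "google".toList) <:+ h ∨ (['.'] ++ "google".toList ++ ['.']) <:+: h := by
      rcases Bool.or_eq_true_iff.mp hb with hb | h4
      rcases Bool.or_eq_true_iff.mp hb with hb | h3
      rcases Bool.or_eq_true_iff.mp hb with h1 | h2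
      · exact Or.inl (by simpa using h1)
      · exact Or.inr (Or.inl (by simpa using (PySem.Chars.startswith_iff _ _).mp h2))
      · exact Or.inr (Or.inr (Or.inl (by simpa using (PySem.Chars.endswith_iff _ _).mp h3)))
      · exact Or.inr (Or.inr (Or.inr (by simpa using (PySem.Chars.isIn_iff_infix _ _).mp h4)))
    obtain ⟨pre, suf, heq, hpre, hsuf⟩ := (decomp_iff "google".toList h).mpr h4
    subst heq
    have := mem_splitDot_mpr _ hdot pre.length pre (le_refl _) suf hpre hsuf
    simpa using this

-- ===== VERDICT (by name: the statement is the Claim_ definition above) =====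
theorem is_google_host_py_spec : Claim_equal_is_google_host_py := by
  intro hostname _
  unfold Spec_is_google_host_py is_google_host_py is_google_host_py_alt
  exact core_eq _
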